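-- pv_equiv track=rewrite | github.com/cheeseman-lab/brieflow | workflow/lib/aggregate/cell_data_utils.py | get_feature_table_cols
-- ===== SOURCE A (Python) =====
-- def get_feature_table_cols(feature_cols, compartment_combos=None):
--     """Filter feature columns based on specific tags and compartments.
--
--     Args:
--         feature_cols (list): List of feature column names.
--         compartment_combos (list, optional): List of compartment prefixes to include
--             (e.g., ['nucleus', 'cell', 'vacuole']). Defaults to ['nucleus', 'cell'].
--
--     Returns:
--         list: Filtered list of feature column names.
--     """
--     # Default to nucleus and cell if no compartments specified
--     if compartment_combos is None:
--         compartment_combos = ["nucleus", "cell"]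
--
--     # Define compartment-specific tags
--     compartment_tags = {
--         "nucleus": {
--             "intensity": ["mean", "int", "mass_displacement", "mean_edge", "std_edge", "mean_frac_0", "mean_frac_3"],
--             "shape": ["area", "solidity", "form_factor", "eccentricity"],
--             "overlap": ["manders"]
--         },
--         "cell": {
--             "intensity": ["mean", "int", "mass_displacement", "mean_edge", "std_edge", "mean_frac_0", "mean_frac_3"],
--             "shape": ["area", "solidity", "form_factor", "eccentricity"],
--             "overlap": ["manders"]
--         },
--         "vacuole": {
--             "intensity": ["mean"],
--             "shape": ["area", "diameter"],
--             "distance": ["distance_to_nucleus"]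
--         }
--     }
--
--     # Initialize lists to store columns for each feature type
--     intensity_cols = []
--     shape_cols = []
--     overlap_cols = []
--     distance_cols = []  # New category for vacuole distance measurements
--
--     # Filter columns based on compartments and tags
--     for col in feature_cols:
--         # Check if column belongs to any of the specified compartments
--         for compartment in compartment_combos:
--             if col.startswith(f"{compartment}_"):
--                 # Get tags for this compartment
--                 tags = compartment_tags.get(compartment, {})
--
--                 # Check intensity features - must be at END of string
--                 if any(col.lower().endswith(tag) for tag in tags.get("intensity", [])):
--                     intensity_cols.append(col)
--                     break
--
--                 # Check shape features - must be at END of string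
--                 elif any(col.lower().endswith(tag) for tag in tags.get("shape", [])):
--                     shape_cols.append(col)
--                     break
--
--                 # Check overlap features - can be anywhere in string
--                 elif any(tag in col.lower() for tag in tags.get("overlap", [])):
--                     overlap_cols.append(col)
--                     break
--
--                 # Check distance features - can be anywhere in string
--                 elif any(tag in col.lower() for tag in tags.get("distance", [])):
--                     distance_cols.append(col)
--                     break
--
--     # Create a new list with selected columns, preserving the label column if it exists
--     selected_columns = []
--     if "label" in feature_cols:
--         selected_columns.append("label")
--
--     # Add columns in an organized way with clear section breaks
--     selected_columns.extend(intensity_cols)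
--     selected_columns.extend(shape_cols)
--     selected_columns.extend(overlap_cols)
--     selected_columns.extend(distance_cols)
--
--     return selected_columns
-- ===== SOURCE B (Python) =====
-- _COMPARTMENT_TAGS = {
--     "nucleus": {
--         "intensity": ["mean", "int", "mass_displacement", "mean_edge", "std_edge", "mean_frac_0", "mean_frac_3"],
--         "shape": ["area", "solidity", "form_factor", "eccentricity"],
--         "overlap": ["manders"],
--     },
--     "cell": {
--         "intensity": ["mean", "int", "mass_displacement", "mean_edge", "std_edge", "mean_frac_0", "mean_frac_3"],
--         "shape": ["area", "solidity", "form_factor", "eccentricity"],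
--         "overlap": ["manders"],
--     },
--     "vacuole": {
--         "intensity": ["mean"],
--         "shape": ["area", "diameter"],
--         "distance": ["distance_to_nucleus"],
--     },
-- }
--
-- # category kinds in priority order: (dict key, matches-anywhere?, sort rank)
-- _KINDS = (("intensity", False, 0), ("shape", False, 1), ("overlap", True, 2), ("distance", True, 3))
--
--
-- def _build_rules(combos):
--     """Flatten the compartment/kind/tag hierarchy into ONE priority-ordered rule table."""
--     return [(comp + "_", tag, anywhere, rank)
--             for comp in combos
--             for kind, anywhere, rank in _KINDS
--             for tag in _COMPARTMENT_TAGS.get(comp, {}).get(kind, [])]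
--
--
-- def _rank(col, rules):
--     """Rank of the first rule the column matches, or None."""
--     low = col.lower()
--     return next((rank for prefix, tag, anywhere, rank in rules
--                  if col.startswith(prefix) and ((tag in low) if anywhere else low.endswith(tag))), None)
--
--
-- def get_feature_table_cols(feature_cols, compartment_combos=None):
--     """Decorate-and-sort: rank each column against a flat rule table, then
--     stable-sort the (rank, column) pairs by rank and emit, 'label' first if present."""
--     combos = ["nucleus", "cell"] if compartment_combos is None else compartment_combos
--     rules = _build_rules(combos)
--     ranked = [(r, col) for col in feature_cols if (r := _rank(col, rules)) is not None]
--     ranked.sort(key=lambda t: t[0])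
--     head = ["label"] if "label" in feature_cols else []
--     return head + [col for _, col in ranked]
-- ===== Notes on version B (the rewrite author's own statement) =====
-- stated objective: alternative
-- what changed: Replaces A's single interleaved pass appending into four accumulator lists via nested compartment/kind scans with a decorate-and-sort scheme: the compartment/kind/tag hierarchy is flattened once into one priority-ordered rule table, each column gets the rank of its first matching rule, and the (rank, column) pairs are stable-sorted by rank.
import Mathlib
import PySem

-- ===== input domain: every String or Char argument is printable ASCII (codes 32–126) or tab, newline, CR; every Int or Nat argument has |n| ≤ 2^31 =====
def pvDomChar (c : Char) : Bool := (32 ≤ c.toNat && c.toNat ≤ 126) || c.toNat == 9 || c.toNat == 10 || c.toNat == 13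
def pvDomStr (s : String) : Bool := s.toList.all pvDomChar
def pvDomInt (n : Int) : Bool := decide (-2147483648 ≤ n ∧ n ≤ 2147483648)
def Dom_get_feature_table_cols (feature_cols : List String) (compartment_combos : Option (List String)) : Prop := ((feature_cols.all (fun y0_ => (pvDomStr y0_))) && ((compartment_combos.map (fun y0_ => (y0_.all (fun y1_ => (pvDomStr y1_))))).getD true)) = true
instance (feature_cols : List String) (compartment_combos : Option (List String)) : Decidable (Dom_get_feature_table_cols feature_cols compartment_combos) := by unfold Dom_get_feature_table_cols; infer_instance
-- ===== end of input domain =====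

-- B replaces A's nested per-column compartment/tag scans with four accumulator lists by a
-- decorate-and-sort scheme: one flat priority-ordered rule table, a rank per column, and a
-- stable sort of (rank, column) pairs (objective: alternative decomposition, same cost).

-- ===== PORT A =====
-- the compartment_tags dict literal of A
def pvTagsA : PySem.Dict String (PySem.Dict String (List String)) :=
  PySem.Dict.ofList
    [ ("nucleus", PySem.Dict.ofList
        [ ("intensity", ["mean", "int", "mass_displacement", "mean_edge", "std_edge", "mean_frac_0", "mean_frac_3"])
        , ("shape", ["area", "solidity", "form_factor", "eccentricity"])
        , ("overlap", ["manders"]) ])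
    , ("cell", PySem.Dict.ofList
        [ ("intensity", ["mean", "int", "mass_displacement", "mean_edge", "std_edge", "mean_frac_0", "mean_frac_3"])
        , ("shape", ["area", "solidity", "form_factor", "eccentricity"])
        , ("overlap", ["manders"]) ])
    , ("vacuole", PySem.Dict.ofList
        [ ("intensity", ["mean"])
        , ("shape", ["area", "diameter"])
        , ("distance", ["distance_to_nucleus"]) ]) ]

-- A's inner 'for compartment in compartment_combos' loop (break = return of the updated state)
def pvLoopA (col : String) (combos : List String)
    (ic sc oc dc : List String) :
    List String × List String × List String × List String :=
  match combos with
  | [] => (ic, sc, oc, dc)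
  | comp :: rest =>
    if PySem.Str.startswith col (comp ++ "_") then
      let tags := pvTagsA.getD comp PySem.Dict.empty
      if (tags.getD "intensity" []).any (fun t => PySem.Str.endswith (PySem.Str.lower col) t) then
        (ic ++ [col], sc, oc, dc)
      else if (tags.getD "shape" []).any (fun t => PySem.Str.endswith (PySem.Str.lower col) t) then
        (ic, sc ++ [col], oc, dc)
      else if (tags.getD "overlap" []).any (fun t => PySem.Str.isIn t (PySem.Str.lower col)) then
        (ic, sc, oc ++ [col], dc)
      else if (tags.getD "distance" []).any (fun t => PySem.Str.isIn t (PySem.Str.lower col)) then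
        (ic, sc, oc, dc ++ [col])
      else pvLoopA col rest ic sc oc dc
    else pvLoopA col rest ic sc oc dc

def get_feature_table_cols (feature_cols : List String) (compartment_combos : Option (List String)) : List String :=
  let combos := compartment_combos.getD ["nucleus", "cell"]
  let st := feature_cols.foldl
    (fun (st : List String × List String × List String × List String) col =>
      pvLoopA col combos st.1 st.2.1 st.2.2.1 st.2.2.2)
    ([], [], [], [])
  let selected := if feature_cols.contains "label" then ["label"] else []
  selected ++ st.1 ++ st.2.1 ++ st.2.2.1 ++ st.2.2.2

-- ===== PORT B =====
-- Source B's module-level _COMPARTMENT_TAGS dict is the same literal as A's compartment_tags;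
-- it is shared as pvTagsA above to avoid a duplicated definition.

-- Source B's _KINDS tuple: (dict key, matches-anywhere?, sort rank)
def pvKindsB : List (String × Bool × Int) :=
  [("intensity", false, 0), ("shape", false, 1), ("overlap", true, 2), ("distance", true, 3)]

-- Source B's _build_rules comprehension: one flat priority-ordered rule table
def pvBuildRules (combos : List String) : List (String × String × Bool × Int) :=
  combos.flatMap fun comp =>
    pvKindsB.flatMap fun kd =>
      ((pvTagsA.getD comp PySem.Dict.empty).getD kd.1 []).map
        (fun tag => (comp ++ "_", tag, kd.2.1, kd.2.2))

-- Source B's _rank: rank of the first rule the column matches (next(…, None) = find?)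
def pvRank (col : String) (rules : List (String × String × Bool × Int)) : Option Int :=
  let low := PySem.Str.lower col
  (rules.find? (fun r =>
      PySem.Str.startswith col r.1 &&
        (if r.2.2.1 then PySem.Str.isIn r.2.1 low else PySem.Str.endswith low r.2.1))).map
    (fun r => r.2.2.2)

def get_feature_table_cols_alt (feature_cols : List String) (compartment_combos : Option (List String)) : List String :=
  let combos := match compartment_combos with
    | none => ["nucleus", "cell"]
    | some cs => cs
  let rules := pvBuildRules combos
  let ranked := feature_cols.filterMap (fun col => (pvRank col rules).map (fun r => (r, col)))
  let ranked := PySem.List.sorted ranked (fun t => t.1) false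
  let head := if feature_cols.contains "label" then ["label"] else []
  head ++ ranked.map (fun t => t.2)

-- ===== PRECONDITION & SPEC =====
def Spec_get_feature_table_cols (feature_cols : List String) (compartment_combos : Option (List String)) (out : List String) : Prop := out = get_feature_table_cols_alt feature_cols compartment_combos
instance (feature_cols : List String) (compartment_combos : Option (List String)) (out : List String) : Decidable (Spec_get_feature_table_cols feature_cols compartment_combos out) := by unfold Spec_get_feature_table_cols; infer_instance

-- ===== CLAIM (what is proved, stated in full; the proofs are below) =====
def Claim_equal_get_feature_table_cols : Prop := ∀ (feature_cols : List String) (compartment_combos : Option (List String)), Dom_get_feature_table_cols feature_cols compartment_combos → Spec_get_feature_table_cols feature_cols compartment_combos (get_feature_table_cols feature_cols compartment_combos)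

-- ===== LEMMAS AND PROOFS =====

theorem pv_insertBy_cons {α : Type} (before : α → α → Bool) (x a : α) (l : List α) :
    PySem.List.insertBy before x (a :: l) =
      if before x a then x :: a :: l else a :: PySem.List.insertBy before x l := rfl

-- inserting x into u ++ v when it goes after all of u and before all of v
theorem pv_insertBy_blocks {α : Type} (before : α → α → Bool) (x : α) (u v : List α)
    (hu : ∀ y ∈ u, before x y = false) (hv : ∀ y ∈ v, before x y = true) :
    PySem.List.insertBy before x (u ++ v) = u ++ x :: v := by
  induction u with
  | nil =>
    cases v with
    | nil => rfl
    | cons h t => simp [pv_insertBy_cons, hv h (by simp)]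
  | cons a u ih =>
    simp only [List.cons_append, pv_insertBy_cons, hu a (by simp)]
    simp [ih (fun y hy => hu y (by simp [hy]))]

theorem pv_sorted_append_singleton {α κ : Type} [LT κ] [DecidableLT κ]
    (ys : List α) (x : α) (key : α → κ) :
    PySem.List.sorted (ys ++ [x]) key false =
      PySem.List.insertBy (fun a b => decide (key a < key b)) x (PySem.List.sorted ys key false) := by
  rw [PySem.List.sorted_eq_foldl_insertBy, PySem.List.sorted_eq_foldl_insertBy, List.foldl_append]
  rfl

-- a stable sort of pairs whose keys are among 0..3 is the four key-buckets in order
theorem pv_sorted_four {α : Type} (xs : List (Int × α))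
    (h : ∀ p ∈ xs, p.1 = 0 ∨ p.1 = 1 ∨ p.1 = 2 ∨ p.1 = 3) :
    PySem.List.sorted xs (fun t => t.1) false =
      xs.filter (fun t => t.1 == 0) ++ xs.filter (fun t => t.1 == 1) ++
      xs.filter (fun t => t.1 == 2) ++ xs.filter (fun t => t.1 == 3) := by
  induction xs using List.reverseRecOn with
  | nil => rfl
  | append_singleton ys x ih =>
    rw [pv_sorted_append_singleton, ih (fun p hp => h p (by simp [hp]))]
    have hkey : ∀ (k : Int) (y : Int × α), y ∈ ys.filter (fun t => t.1 == k) → y.1 = k := by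
      intro k y hy
      have := (List.mem_filter.mp hy).2
      simpa using this
    set F0 := ys.filter (fun t => t.1 == 0) with hF0
    set F1 := ys.filter (fun t => t.1 == 1) with hF1
    set F2 := ys.filter (fun t => t.1 == 2) with hF2
    set F3 := ys.filter (fun t => t.1 == 3) with hF3
    rcases h x (by simp) with hx | hx | hx | hx
    · rw [show F0 ++ F1 ++ F2 ++ F3 = F0 ++ (F1 ++ F2 ++ F3) from by simp,
          pv_insertBy_blocks (fun a b => decide (a.1 < b.1)) x F0 (F1 ++ F2 ++ F3)
            (by intro y hy; have := hkey 0 y hy; simp [this, hx])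
            (by intro y hy
                rcases List.mem_append.mp hy with hy | hy
                · rcases List.mem_append.mp hy with hy | hy
                  · have := hkey 1 y hy; simp [this, hx]
                  · have := hkey 2 y hy; simp [this, hx]
                · have := hkey 3 y hy; simp [this, hx])]
      simp [hF0, hF1, hF2, hF3, List.filter_append, hx]
    · rw [show F0 ++ F1 ++ F2 ++ F3 = (F0 ++ F1) ++ (F2 ++ F3) from by simp,
          pv_insertBy_blocks (fun a b => decide (a.1 < b.1)) x (F0 ++ F1) (F2 ++ F3)
            (by intro y hy
                rcases List.mem_append.mp hy with hy | hy
                · have := hkey 0 y hy; simp [this, hx]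
                · have := hkey 1 y hy; simp [this, hx])
            (by intro y hy
                rcases List.mem_append.mp hy with hy | hy
                · have := hkey 2 y hy; simp [this, hx]
                · have := hkey 3 y hy; simp [this, hx])]
      simp [hF0, hF1, hF2, hF3, List.filter_append, hx]
    · rw [pv_insertBy_blocks (fun a b => decide (a.1 < b.1)) x (F0 ++ F1 ++ F2) F3
            (by intro y hy
                rcases List.mem_append.mp hy with hy | hy
                · rcases List.mem_append.mp hy with hy | hy
                  · have := hkey 0 y hy; simp [this, hx]
                  · have := hkey 1 y hy; simp [this, hx]
                · have := hkey 2 y hy; simp [this, hx])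
            (by intro y hy; have := hkey 3 y hy; simp [this, hx])]
      simp [hF0, hF1, hF2, hF3, List.filter_append, hx]
    · rw [PySem.List.insertBy_of_forall_not_before _ x (F0 ++ F1 ++ F2 ++ F3)
            (by intro y hy
                rcases List.mem_append.mp hy with hy | hy
                · rcases List.mem_append.mp hy with hy | hy
                  · rcases List.mem_append.mp hy with hy | hy
                    · have := hkey 0 y hy; simp [this, hx]
                    · have := hkey 1 y hy; simp [this, hx]
                  · have := hkey 2 y hy; simp [this, hx]
                · have := hkey 3 y hy; simp [this, hx])]
      simp [hF0, hF1, hF2, hF3, List.filter_append, hx]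

-- every rule's rank is one of 0..3
theorem pv_rule_rank (combos : List String) (r : String × String × Bool × Int)
    (hr : r ∈ pvBuildRules combos) : r.2.2.2 = 0 ∨ r.2.2.2 = 1 ∨ r.2.2.2 = 2 ∨ r.2.2.2 = 3 := by
  simp only [pvBuildRules, pvKindsB, List.mem_flatMap, List.mem_map] at hr
  obtain ⟨comp, _, kd, hkd, tag, _, rfl⟩ := hr
  fin_cases hkd <;> simp

theorem pv_rank_values (col : String) (combos : List String) (k : Int)
    (h : pvRank col (pvBuildRules combos) = some k) : k = 0 ∨ k = 1 ∨ k = 2 ∨ k = 3 := by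
  simp only [pvRank, Option.map_eq_some_iff] at h
  obtain ⟨r, hr, rfl⟩ := h
  exact pv_rule_rank combos r (List.mem_of_find?_eq_some hr)

-- A's inner compartment loop does exactly what the flat rule table's first match says
theorem pvLoopA_eq_rank (col : String) (combos : List String) (ic sc oc dc : List String) :
    pvLoopA col combos ic sc oc dc =
      if pvRank col (pvBuildRules combos) == some 0 then (ic ++ [col], sc, oc, dc)
      else if pvRank col (pvBuildRules combos) == some 1 then (ic, sc ++ [col], oc, dc)
      else if pvRank col (pvBuildRules combos) == some 2 then (ic, sc, oc ++ [col], dc)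
      else if pvRank col (pvBuildRules combos) == some 3 then (ic, sc, oc, dc ++ [col])
      else (ic, sc, oc, dc) := by
  induction combos with
  | nil =>
    rw [pvLoopA]
    simp [pvRank, pvBuildRules]
  | cons comp rest ih =>
    rw [pvLoopA]
    have hsplit : pvBuildRules (comp :: rest) =
        (pvKindsB.flatMap fun kd =>
          ((pvTagsA.getD comp PySem.Dict.empty).getD kd.1 []).map
            (fun tag => (comp ++ "_", tag, kd.2.1, kd.2.2))) ++ pvBuildRules rest := by
      simp [pvBuildRules]
    by_cases hp : PySem.Str.startswith col (comp ++ "_") = true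
    · simp only [if_pos hp]
      set tags := pvTagsA.getD comp PySem.Dict.empty with htags
      set low := PySem.Str.lower col with hlow
      set p : String × String × Bool × Int → Bool := fun r =>
        PySem.Str.startswith col r.1 &&
          (if r.2.2.1 then PySem.Str.isIn r.2.1 low else PySem.Str.endswith low r.2.1) with hpdef
      have hpf : ∀ (b : Bool) (k : Int),
          (p ∘ fun tag => (comp ++ "_", tag, b, k)) =
            (fun t => if b then PySem.Str.isIn t low else PySem.Str.endswith low t) := by
        intro b k
        have hp2 : PySem.Chars.startswith col.toList (comp.toList ++ ['_']) = true := by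
          simpa using hp
        funext t
        cases b <;> simp [hpdef, hp2]
      have hblk : (pvKindsB.flatMap fun kd =>
          (tags.getD kd.1 []).map (fun tag => (comp ++ "_", tag, kd.2.1, kd.2.2))).find? p =
          (((tags.getD "intensity" []).find? (fun t => PySem.Str.endswith low t)).map
              (fun t => (comp ++ "_", t, false, (0:Int)))).or
          ((((tags.getD "shape" []).find? (fun t => PySem.Str.endswith low t)).map
              (fun t => (comp ++ "_", t, false, (1:Int)))).or
          ((((tags.getD "overlap" []).find? (fun t => PySem.Str.isIn t low)).map
              (fun t => (comp ++ "_", t, true, (2:Int)))).or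
          (((tags.getD "distance" []).find? (fun t => PySem.Str.isIn t low)).map
              (fun t => (comp ++ "_", t, true, (3:Int)))))) := by
        simp only [pvKindsB, List.flatMap_cons, List.flatMap_nil, List.append_nil,
          List.find?_append, List.find?_map, hpf]
        simp
      have hrank : pvRank col (pvBuildRules (comp :: rest)) =
          ((((pvKindsB.flatMap fun kd =>
            (tags.getD kd.1 []).map (fun tag => (comp ++ "_", tag, kd.2.1, kd.2.2))).find? p).map
            (fun r => r.2.2.2)).or (pvRank col (pvBuildRules rest))) := by
        simp only [pvRank, hsplit, List.find?_append]
        cases (pvKindsB.flatMap fun kd =>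
            (tags.getD kd.1 []).map (fun tag => (comp ++ "_", tag, kd.2.1, kd.2.2))).find? p <;> simp
      by_cases hi : ((tags.getD "intensity" []).any (fun t => PySem.Str.endswith (PySem.Str.lower col) t)) = true
      · obtain ⟨t0, ht0, hpt0⟩ := List.any_eq_true.mp hi
        have hfind : (tags.getD "intensity" []).find? (fun t => PySem.Str.endswith low t) ≠ none := by
          rw [Ne, List.find?_eq_none]
          push_neg
          exact ⟨t0, ht0, by rw [hlow]; exact hpt0⟩
        obtain ⟨t1, ht1⟩ := Option.ne_none_iff_exists'.mp hfind
        have hex : ∃ t ∈ tags.getD "intensity" [], PySem.Chars.endswith low.toList t.toList = true :=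
          ⟨t0, ht0, by rw [hlow]; simpa using hpt0⟩
        rw [hrank, hblk, ht1]
        simp [hex]
      · have hfi : (tags.getD "intensity" []).find? (fun t => PySem.Str.endswith low t) = none := by
          rw [List.find?_eq_none]
          intro t ht
          have := List.any_eq_true.not.mp hi
          push_neg at this
          rw [hlow]
          exact this t ht
        have hni : ¬ ∃ t ∈ tags.getD "intensity" [], PySem.Chars.endswith low.toList t.toList = true := by
          rw [hlow]; simpa using hi
        by_cases hs : ((tags.getD "shape" []).any (fun t => PySem.Str.endswith (PySem.Str.lower col) t)) = true
        · obtain ⟨t0, ht0, hpt0⟩ := List.any_eq_true.mp hs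
          have hfind : (tags.getD "shape" []).find? (fun t => PySem.Str.endswith low t) ≠ none := by
            rw [Ne, List.find?_eq_none]; push_neg
            exact ⟨t0, ht0, by rw [hlow]; exact hpt0⟩
          obtain ⟨t1, ht1⟩ := Option.ne_none_iff_exists'.mp hfind
          have hex : ∃ t ∈ tags.getD "shape" [], PySem.Chars.endswith low.toList t.toList = true :=
            ⟨t0, ht0, by rw [hlow]; simpa using hpt0⟩
          rw [hrank, hblk, hfi, ht1]
          simp [hni, hex]
        · have hfs : (tags.getD "shape" []).find? (fun t => PySem.Str.endswith low t) = none := by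
            rw [List.find?_eq_none]
            intro t ht
            have := List.any_eq_true.not.mp hs
            push_neg at this
            rw [hlow]; exact this t ht
          have hns : ¬ ∃ t ∈ tags.getD "shape" [], PySem.Chars.endswith low.toList t.toList = true := by
            rw [hlow]; simpa using hs
          by_cases ho : ((tags.getD "overlap" []).any (fun t => PySem.Str.isIn t (PySem.Str.lower col))) = true
          · obtain ⟨t0, ht0, hpt0⟩ := List.any_eq_true.mp ho
            have hfind : (tags.getD "overlap" []).find? (fun t => PySem.Str.isIn t low) ≠ none := by
              rw [Ne, List.find?_eq_none]; push_neg
              exact ⟨t0, ht0, by rw [hlow]; exact hpt0⟩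
            obtain ⟨t1, ht1⟩ := Option.ne_none_iff_exists'.mp hfind
            have hex : ∃ t ∈ tags.getD "overlap" [], PySem.Chars.isIn t.toList low.toList = true :=
              ⟨t0, ht0, by rw [hlow]; simpa using hpt0⟩
            rw [hrank, hblk, hfi, hfs, ht1]
            simp [hni, hns, hex]
          · have hfo : (tags.getD "overlap" []).find? (fun t => PySem.Str.isIn t low) = none := by
              rw [List.find?_eq_none]
              intro t ht
              have := List.any_eq_true.not.mp ho
              push_neg at this
              rw [hlow]; exact this t ht
            have hno : ¬ ∃ t ∈ tags.getD "overlap" [], PySem.Chars.isIn t.toList low.toList = true := by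
              rw [hlow]; simpa using ho
            by_cases hd : ((tags.getD "distance" []).any (fun t => PySem.Str.isIn t (PySem.Str.lower col))) = true
            · obtain ⟨t0, ht0, hpt0⟩ := List.any_eq_true.mp hd
              have hfind : (tags.getD "distance" []).find? (fun t => PySem.Str.isIn t low) ≠ none := by
                rw [Ne, List.find?_eq_none]; push_neg
                exact ⟨t0, ht0, by rw [hlow]; exact hpt0⟩
              obtain ⟨t1, ht1⟩ := Option.ne_none_iff_exists'.mp hfind
              have hex : ∃ t ∈ tags.getD "distance" [], PySem.Chars.isIn t.toList low.toList = true :=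
                ⟨t0, ht0, by rw [hlow]; simpa using hpt0⟩
              rw [hrank, hblk, hfi, hfs, hfo, ht1]
              simp [hni, hns, hno, hex]
            · have hfd : (tags.getD "distance" []).find? (fun t => PySem.Str.isIn t low) = none := by
                rw [List.find?_eq_none]
                intro t ht
                have := List.any_eq_true.not.mp hd
                push_neg at this
                rw [hlow]; exact this t ht
              have hnd : ¬ ∃ t ∈ tags.getD "distance" [], PySem.Chars.isIn t.toList low.toList = true := by
                rw [hlow]; simpa using hd
              rw [hrank, hblk, hfi, hfs, hfo, hfd]
              simp only [Option.map_none, Option.none_or]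
              rw [ih]
              simp [hni, hns, hno, hnd]
    · simp only [if_neg hp]
      have hblknone : ((pvKindsB.flatMap fun kd =>
          ((pvTagsA.getD comp PySem.Dict.empty).getD kd.1 []).map
            (fun tag => (comp ++ "_", tag, kd.2.1, kd.2.2))).find? (fun r =>
          PySem.Str.startswith col r.1 &&
            (if r.2.2.1 then PySem.Str.isIn r.2.1 (PySem.Str.lower col)
             else PySem.Str.endswith (PySem.Str.lower col) r.2.1))) = none := by
        rw [List.find?_eq_none]
        intro r hr
        simp only [List.mem_flatMap, List.mem_map] at hr
        obtain ⟨kd, _, tag, _, rfl⟩ := hr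
        have hp2 : PySem.Chars.startswith col.toList (comp.toList ++ ['_']) = false := by
          simpa using hp
        simp [hp2]
      have : pvRank col (pvBuildRules (comp :: rest)) = pvRank col (pvBuildRules rest) := by
        simp only [pvRank, hsplit, List.find?_append, hblknone, Option.none_or]
      rw [this]
      exact ih

-- A's outer fold is the four rank-buckets appended to the accumulators
theorem pvFoldA_eq_filters (cols : List String) (combos : List String) (ic sc oc dc : List String) :
    cols.foldl
      (fun (st : List String × List String × List String × List String) col =>
        pvLoopA col combos st.1 st.2.1 st.2.2.1 st.2.2.2)
      (ic, sc, oc, dc) =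
      (ic ++ cols.filter (fun c => pvRank c (pvBuildRules combos) == some 0),
       sc ++ cols.filter (fun c => pvRank c (pvBuildRules combos) == some 1),
       oc ++ cols.filter (fun c => pvRank c (pvBuildRules combos) == some 2),
       dc ++ cols.filter (fun c => pvRank c (pvBuildRules combos) == some 3)) := by
  induction cols generalizing ic sc oc dc with
  | nil => simp
  | cons col rest ih =>
    rw [List.foldl_cons]
    show List.foldl (fun (st : List String × List String × List String × List String) col =>
        pvLoopA col combos st.1 st.2.1 st.2.2.1 st.2.2.2) (pvLoopA col combos ic sc oc dc) rest = _
    rw [pvLoopA_eq_rank]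
    split_ifs with h1 h2 h3 h4 <;> rw [ih] <;> simp_all

-- the k-bucket of the decorated list is the filter of the columns by rank k
theorem pv_ranked_filter (cols : List String) (rules : List (String × String × Bool × Int)) (k : Int) :
    ((cols.filterMap (fun col => (pvRank col rules).map (fun r => (r, col)))).filter
        (fun t => t.1 == k)).map (fun t => t.2) =
      cols.filter (fun c => pvRank c rules == some k) := by
  induction cols with
  | nil => simp
  | cons c rest ih =>
    cases hr : pvRank c rules with
    | none => simp [hr, ih]
    | some r =>
      by_cases hk : r = k
      · subst hk
        simp [hr, ih]
      · simp [hr, hk, ih]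

-- every decorated pair's rank is among 0..3
theorem pv_ranked_mem (cols : List String) (combos : List String) (p : Int × String)
    (hp : p ∈ cols.filterMap (fun col => (pvRank col (pvBuildRules combos)).map (fun r => (r, col)))) :
    p.1 = 0 ∨ p.1 = 1 ∨ p.1 = 2 ∨ p.1 = 3 := by
  simp only [List.mem_filterMap, Option.map_eq_some_iff] at hp
  obtain ⟨col, _, r, hr, rfl⟩ := hp
  exact pv_rank_values col combos r hr

-- ===== VERDICT (by name: the statement is the Claim_ definition above) =====
theorem get_feature_table_cols_spec : Claim_equal_get_feature_table_cols := by
  intro feature_cols compartment_combos _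
  unfold Spec_get_feature_table_cols get_feature_table_cols get_feature_table_cols_alt
  cases compartment_combos with
  | none =>
    dsimp only [Option.getD]
    rw [pvFoldA_eq_filters, pv_sorted_four _ (pv_ranked_mem feature_cols ["nucleus", "cell"])]
    simp [pv_ranked_filter]
  | some cs =>
    dsimp only [Option.getD]
    rw [pvFoldA_eq_filters, pv_sorted_four _ (pv_ranked_mem feature_cols cs)]
    simp [pv_ranked_filter]
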